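-- pv_equiv track=rewrite | github.com/Sekie/TranIEST | traniest/operator_algebra/mp2_algebra.py | MakeRemovedCrAnLists
-- ===== SOURCE A (Python) =====
-- def MakeRemovedCrAnLists(CrSym, AnSym, Remove1, Remove2, Remove3, Remove4):
-- 	Cr1 = []; Cr2 = []; Cr3 = []; Cr4 = []
-- 	An1 = []; An2 = []; An3 = []; An4 = []
-- 	for Rem in Remove1:
-- 		C = CrSym.copy()
-- 		A = AnSym.copy()
-- 		for x in Rem:
-- 			if x in C:
-- 				C.remove(x)
-- 			if x in A:
-- 				A.remove(x)
-- 		Cr1.append(C)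
-- 		An1.append(A)
-- 	for Rem in Remove2:
-- 		C = CrSym.copy()
-- 		A = AnSym.copy()
-- 		for x in Rem:
-- 			if x in C:
-- 				C.remove(x)
-- 			if x in A:
-- 				A.remove(x)
-- 		Cr2.append(C)
-- 		An2.append(A)
-- 	for Rem in Remove3:
-- 		C = CrSym.copy()
-- 		A = AnSym.copy()
-- 		for x in Rem:
-- 			if x in C:
-- 				C.remove(x)
-- 			if x in A:
-- 				A.remove(x)
-- 		Cr3.append(C)
-- 		An3.append(A)
-- 	for Rem in Remove4:
-- 		C = CrSym.copy()
-- 		A = AnSym.copy()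
-- 		for x in Rem:
-- 			if x in C:
-- 				C.remove(x)
-- 			if x in A:
-- 				A.remove(x)
-- 		Cr4.append(C)
-- 		An4.append(A)
-- 	return Cr1, Cr2, Cr3, Cr4, An1, An2, An3, An4
-- ===== SOURCE B (Python) =====
-- def MakeRemovedCrAnLists(CrSym, AnSym, Remove1, Remove2, Remove3, Remove4):
-- 	def strike(sym, rem):
-- 		quota = {}
-- 		for x in rem:
-- 			quota[x] = quota.get(x, 0) + 1
-- 		out = []
-- 		for s in sym:
-- 			q = quota.get(s, 0)
-- 			if q:
-- 				quota[s] = q - 1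
-- 			else:
-- 				out.append(s)
-- 		return out
-- 	groups = (Remove1, Remove2, Remove3, Remove4)
-- 	crs = [[strike(CrSym, rem) for rem in R] for R in groups]
-- 	ans = [[strike(AnSym, rem) for rem in R] for R in groups]
-- 	return tuple(crs + ans)
-- ===== Notes on version B (the rewrite author's own statement) =====
-- stated objective: faster
-- what changed: Replaces A's repeated 'x in list' membership scans and list.remove calls (O(R*N) per removal list) with a removal-quota dict built once from each Rem and a single order-preserving pass over CrSym/AnSym (O(R+N) per removal list), and builds the eight result lists by comprehensions instead of four copy-pasted accumulator loops.
import Mathlib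
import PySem

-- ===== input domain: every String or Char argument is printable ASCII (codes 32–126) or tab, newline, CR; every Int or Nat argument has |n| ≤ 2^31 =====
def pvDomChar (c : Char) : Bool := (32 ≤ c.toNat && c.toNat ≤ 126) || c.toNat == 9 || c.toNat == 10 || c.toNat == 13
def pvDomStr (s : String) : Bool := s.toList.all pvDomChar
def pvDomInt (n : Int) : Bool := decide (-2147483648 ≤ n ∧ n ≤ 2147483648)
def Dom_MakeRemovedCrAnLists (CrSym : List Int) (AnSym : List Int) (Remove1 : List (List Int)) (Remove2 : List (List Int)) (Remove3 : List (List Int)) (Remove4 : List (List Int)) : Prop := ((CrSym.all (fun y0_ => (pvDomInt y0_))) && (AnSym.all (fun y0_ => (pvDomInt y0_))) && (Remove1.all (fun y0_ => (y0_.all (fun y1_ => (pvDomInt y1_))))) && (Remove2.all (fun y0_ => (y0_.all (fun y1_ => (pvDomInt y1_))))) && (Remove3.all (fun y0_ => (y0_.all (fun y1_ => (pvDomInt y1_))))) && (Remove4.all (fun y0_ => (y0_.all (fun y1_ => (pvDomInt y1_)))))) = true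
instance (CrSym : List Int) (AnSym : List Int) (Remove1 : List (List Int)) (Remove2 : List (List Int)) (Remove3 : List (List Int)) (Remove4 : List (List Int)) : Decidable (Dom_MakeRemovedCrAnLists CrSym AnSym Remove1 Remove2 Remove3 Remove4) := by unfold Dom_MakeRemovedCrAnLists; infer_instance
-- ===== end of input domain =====

-- B replaces A's per-element membership-scan-and-remove loops with a removal-quota
-- counter and one pass per symbol list (objective: faster, asymptotically).


-- ===== PORT A =====
def pvAInner (CrSym : List Int) (AnSym : List Int) (Rem : List Int) : List Int × List Int :=
  Rem.foldl (fun ca x =>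
    let c := if x ∈ ca.1 then ((PySem.List.remove? ca.1 x).getD ca.1) else ca.1
    let a := if x ∈ ca.2 then ((PySem.List.remove? ca.2 x).getD ca.2) else ca.2
    (c, a)) (CrSym, AnSym)

def pvAGroup (CrSym : List Int) (AnSym : List Int) (Rems : List (List Int)) :
    List (List Int) × List (List Int) :=
  Rems.foldl (fun s rem =>
    let ca := pvAInner CrSym AnSym rem
    (s.1 ++ [ca.1], s.2 ++ [ca.2])) ([], [])

def MakeRemovedCrAnLists (CrSym : List Int) (AnSym : List Int) (Remove1 : List (List Int)) (Remove2 : List (List Int)) (Remove3 : List (List Int)) (Remove4 : List (List Int)) : List (List (List Int)) :=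
  let p1 := pvAGroup CrSym AnSym Remove1
  let p2 := pvAGroup CrSym AnSym Remove2
  let p3 := pvAGroup CrSym AnSym Remove3
  let p4 := pvAGroup CrSym AnSym Remove4
  [p1.1, p2.1, p3.1, p4.1, p1.2, p2.2, p3.2, p4.2]

-- ===== PORT B =====
-- quota[x] = quota.get(x, 0) + 1 over rem
def pvBQuota (rem : List Int) : PySem.Dict Int Int :=
  rem.foldl (fun d x => d.insert x (d.getD x 0 + 1)) PySem.Dict.empty

-- single order-preserving pass: skip s while its quota is nonzero
def pvBPass (quota : PySem.Dict Int Int) (sym : List Int) : List Int :=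
  match sym with
  | [] => []
  | s :: t =>
    let q := quota.getD s 0
    if q ≠ 0 then pvBPass (quota.insert s (q - 1)) t
    else s :: pvBPass quota t

def pvBStrike (sym : List Int) (rem : List Int) : List Int :=
  pvBPass (pvBQuota rem) sym

def MakeRemovedCrAnLists_alt (CrSym : List Int) (AnSym : List Int) (Remove1 : List (List Int)) (Remove2 : List (List Int)) (Remove3 : List (List Int)) (Remove4 : List (List Int)) : List (List (List Int)) :=
  let groups := [Remove1, Remove2, Remove3, Remove4]
  let crs := groups.map (fun R => R.map (fun rem => pvBStrike CrSym rem))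
  let ans := groups.map (fun R => R.map (fun rem => pvBStrike AnSym rem))
  crs ++ ans

-- ===== PRECONDITION & SPEC =====
def Spec_MakeRemovedCrAnLists (CrSym : List Int) (AnSym : List Int) (Remove1 : List (List Int)) (Remove2 : List (List Int)) (Remove3 : List (List Int)) (Remove4 : List (List Int)) (out : List (List (List Int))) : Prop := out = MakeRemovedCrAnLists_alt CrSym AnSym Remove1 Remove2 Remove3 Remove4
instance (CrSym : List Int) (AnSym : List Int) (Remove1 : List (List Int)) (Remove2 : List (List Int)) (Remove3 : List (List Int)) (Remove4 : List (List Int)) (out : List (List (List Int))) : Decidable (Spec_MakeRemovedCrAnLists CrSym AnSym Remove1 Remove2 Remove3 Remove4 out) := by unfold Spec_MakeRemovedCrAnLists; infer_instance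

-- ===== CLAIM (what is proved, stated in full; the proofs are below) =====
def Claim_equal_MakeRemovedCrAnLists : Prop := ∀ (CrSym : List Int) (AnSym : List Int) (Remove1 : List (List Int)) (Remove2 : List (List Int)) (Remove3 : List (List Int)) (Remove4 : List (List Int)), Dom_MakeRemovedCrAnLists CrSym AnSym Remove1 Remove2 Remove3 Remove4 → Spec_MakeRemovedCrAnLists CrSym AnSym Remove1 Remove2 Remove3 Remove4 (MakeRemovedCrAnLists CrSym AnSym Remove1 Remove2 Remove3 Remove4)

-- ===== LEMMAS AND PROOFS =====

-- Both strikes compute sym.diff rem: A removes, per x in rem, the first occurrence of x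
-- if present (= List.erase); B skips, per value v, the first (count of v in rem) occurrences.

theorem pvAInner_eq_diff (CrSym AnSym rem : List Int) :
    pvAInner CrSym AnSym rem = (CrSym.diff rem, AnSym.diff rem) := by
  induction rem generalizing CrSym AnSym with
  | nil => rfl
  | cons x rs ih =>
    have hstep : ∀ l : List Int,
        (if x ∈ l then ((PySem.List.remove? l x).getD l) else l) = l.erase x := by
      intro l
      by_cases h : x ∈ l
      · rw [if_pos h, PySem.List.remove?_eq_some_erase l x h, Option.getD_some]
      · rw [if_neg h, List.erase_of_not_mem h]
    calc pvAInner CrSym AnSym (x :: rs)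
        = pvAInner (CrSym.erase x) (AnSym.erase x) rs := by
          simp only [pvAInner, List.foldl_cons, hstep]
      _ = ((CrSym.erase x).diff rs, (AnSym.erase x).diff rs) := ih _ _
      _ = (CrSym.diff (x :: rs), AnSym.diff (x :: rs)) := by
          simp only [List.diff_cons]

theorem pvBPass_eq_diff (sym : List Int) :
    ∀ (rem : List Int) (d : PySem.Dict Int Int),
      (∀ v, d.getD v 0 = (rem.count v : Int)) → pvBPass d sym = sym.diff rem := by
  induction sym with
  | nil => intro rem d _; simp [pvBPass]
  | cons s t ih =>
    intro rem d h
    by_cases hs : s ∈ rem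
    · have hpos : 0 < rem.count s := List.count_pos_iff.mpr hs
      have hq : d.getD s 0 ≠ 0 := by rw [h s]; exact_mod_cast Nat.pos_iff_ne_zero.mp hpos
      rw [pvBPass, if_pos hq, List.cons_diff_of_mem hs]
      apply ih (rem.erase s)
      intro v
      by_cases hv : v = s
      · subst hv
        rw [PySem.Dict.getD_insert_self d v _ 0, h v, List.count_erase_self]
        push_cast [Nat.cast_sub (Nat.one_le_iff_ne_zero.mpr (Nat.pos_iff_ne_zero.mp hpos))]
        ring
      · rw [PySem.Dict.getD_insert_of_ne d _ 0 hv, h v, List.count_erase_of_ne hv]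
    · have hq : d.getD s 0 = 0 := by
        rw [h s, List.count_eq_zero_of_not_mem hs]; rfl
      rw [pvBPass, if_neg (by simp [hq]), List.cons_diff_of_not_mem hs]
      exact congrArg (s :: ·) (ih rem d h)

theorem pvBStrike_eq_diff (sym rem : List Int) : pvBStrike sym rem = sym.diff rem := by
  apply pvBPass_eq_diff
  intro v
  rw [pvBQuota, PySem.Dict.foldl_insert_getD_add_one_eq_counter, PySem.Dict.getD_counter]

theorem pvAGroup_eq_map (CrSym AnSym : List Int) (Rems : List (List Int)) :
    pvAGroup CrSym AnSym Rems =
      (Rems.map (fun rem => pvBStrike CrSym rem), Rems.map (fun rem => pvBStrike AnSym rem)) := by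
  suffices h : ∀ (Rems : List (List Int)) (acc1 acc2 : List (List Int)),
      Rems.foldl (fun s rem =>
        let ca := pvAInner CrSym AnSym rem
        (s.1 ++ [ca.1], s.2 ++ [ca.2])) (acc1, acc2) =
      (acc1 ++ Rems.map (fun rem => pvBStrike CrSym rem),
       acc2 ++ Rems.map (fun rem => pvBStrike AnSym rem)) by
    simpa [pvAGroup] using h Rems [] []
  intro Rems
  induction Rems with
  | nil => intro acc1 acc2; simp
  | cons rem rs ih =>
    intro acc1 acc2
    simp only [List.foldl_cons, pvAInner_eq_diff, pvBStrike_eq_diff, List.map_cons]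
    rw [show (acc1 ++ CrSym.diff rem :: List.map (fun rem => CrSym.diff rem) rs,
          acc2 ++ AnSym.diff rem :: List.map (fun rem => AnSym.diff rem) rs) =
        ((acc1 ++ [CrSym.diff rem]) ++ List.map (fun rem => CrSym.diff rem) rs,
         (acc2 ++ [AnSym.diff rem]) ++ List.map (fun rem => AnSym.diff rem) rs) by simp]
    have := ih (acc1 ++ [CrSym.diff rem]) (acc2 ++ [AnSym.diff rem])
    simp only [pvAInner_eq_diff, pvBStrike_eq_diff] at this ⊢
    exact this

-- ===== VERDICT (by name: the statement is the Claim_ definition above) =====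
theorem MakeRemovedCrAnLists_spec : Claim_equal_MakeRemovedCrAnLists := by
  intro CrSym AnSym R1 R2 R3 R4 _
  unfold Spec_MakeRemovedCrAnLists MakeRemovedCrAnLists MakeRemovedCrAnLists_alt
  simp [pvAGroup_eq_map]
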